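-- pv_equiv track=rewrite | github.com/BIOIN401/Project14-T2PW | src/draft_graph_render.py | _enz_html
-- ===== SOURCE A (Python) =====
-- from typing import Any, Dict, List, Optional, Set
--
-- def _html_escape(text: str) -> str:
--     return text.replace("&", "&amp;").replace("<", "&lt;").replace(">", "&gt;").replace('"', "&quot;")
--
-- def _enz_html(cats: List[str], max_chars: int = 24) -> str:
--     """Join enzyme/catalyst names, word-wrap to max_chars per line, cap total lines at 2."""
--     joined = ", ".join(cats)
--     if len(joined) <= max_chars:
--         return _html_escape(joined)
--     words = joined.split()
--     lines: List[str] = []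
--     cur = ""
--     for w in words:
--         if cur and len(cur) + 1 + len(w) > max_chars:
--             lines.append(cur)
--             if len(lines) == 2:          # hard cap: 2 lines max
--                 lines[-1] = lines[-1].rstrip(",") + "…"
--                 cur = ""
--                 break
--             cur = w
--         else:
--             cur = (cur + " " + w).strip() if cur else w
--     if cur:
--         lines.append(cur)
--     return "<BR/>".join(_html_escape(ln) for ln in lines)
-- ===== SOURCE B (Python) =====
-- def _html_escape(text: str) -> str:
--     return text.replace("&", "&amp;").replace("<", "&lt;").replace(">", "&gt;").replace('"', "&quot;")
--
-- def _take_line(words, max_chars):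
--     """First greedy line and the remaining words (words must be nonempty)."""
--     line = words[0]
--     i = 1
--     while i < len(words) and len(line) + 1 + len(words[i]) <= max_chars:
--         line = line + " " + words[i]
--         i += 1
--     return line, words[i:]
--
-- def _enz_html(cats, max_chars: int = 24) -> str:
--     joined = ", ".join(cats)
--     if len(joined) <= max_chars:
--         return _html_escape(joined)
--     words = joined.split()
--     if not words:
--         return ""
--     line1, rest = _take_line(words, max_chars)
--     if not rest:
--         lines = [line1]
--     else:
--         line2, rest2 = _take_line(rest, max_chars)
--         if rest2:
--             lines = [line1, line2.rstrip(",") + "…"]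
--         else:
--             lines = [line1, line2]
--     return "<BR/>".join(_html_escape(ln) for ln in lines)
-- ===== Notes on version B (the rewrite author's own statement) =====
-- stated objective: simpler
-- what changed: B drops A's accumulator loop with its lines list, in-loop line counting, lines[-1] edit and break, and instead calls a prefix-taking helper at most twice: it takes the first greedy line and the remaining words, then (if words remain) the second greedy line, appending the ellipsis exactly when words are still left over.
import Mathlib
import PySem

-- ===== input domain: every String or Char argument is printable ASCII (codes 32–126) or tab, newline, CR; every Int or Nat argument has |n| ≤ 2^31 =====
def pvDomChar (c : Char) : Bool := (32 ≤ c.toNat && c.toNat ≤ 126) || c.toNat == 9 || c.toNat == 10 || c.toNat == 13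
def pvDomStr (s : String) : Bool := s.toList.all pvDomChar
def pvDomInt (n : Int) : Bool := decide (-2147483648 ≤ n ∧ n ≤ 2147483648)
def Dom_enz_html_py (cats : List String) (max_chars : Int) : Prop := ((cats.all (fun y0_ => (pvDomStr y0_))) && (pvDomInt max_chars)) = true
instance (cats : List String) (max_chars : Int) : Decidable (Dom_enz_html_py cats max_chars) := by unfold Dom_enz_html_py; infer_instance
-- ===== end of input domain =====

-- B replaces A's single accumulator loop (lines list, in-loop cap, break) by a prefix-taking
-- helper used at most twice: first greedy line, then second greedy line, ellipsis iff words
-- remain after it (objective: simpler); proved to return the same string on the whole domain.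


-- ===== PORT A =====
-- _html_escape, shared verbatim by both Pythons (chained .replace calls, in source order)
def pvEscape (s : List Char) : List Char :=
  PySem.Chars.replace (PySem.Chars.replace (PySem.Chars.replace
    (PySem.Chars.replace s "&".toList "&amp;".toList)
    "<".toList "&lt;".toList) ">".toList "&gt;".toList) "\"".toList "&quot;".toList

-- s.rstrip(",") — drop the trailing run of ',' chars (exact for a 1-char strip set)
def pvRstripComma (s : List Char) : List Char :=
  (s.reverse.dropWhile (fun c => c == ',')).reverse

-- A's for-loop over words with its in-loop 2-line cap, `lines[-1] = …` edit and break
def enzLoopA (mc : Int) : List (List Char) → List (List Char) → List Char → List (List Char)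
  | [], lines, cur => if cur.isEmpty then lines else lines ++ [cur]
  | w :: rest, lines, cur =>
    if ¬cur.isEmpty ∧ (cur.length : Int) + 1 + w.length > mc then
      if (lines ++ [cur]).length = 2 then
        -- lines[-1] = lines[-1].rstrip(",") + "…"; cur = ""; break  (cur empty ⇒ no final append)
        lines ++ [pvRstripComma cur ++ "…".toList]
      else enzLoopA mc rest (lines ++ [cur]) w
    else enzLoopA mc rest lines (if cur.isEmpty then w else PySem.Chars.strip (cur ++ ' ' :: w))

def enz_html_py (cats : List String) (max_chars : Int) : String :=
  let joined := PySem.Chars.join ", ".toList (cats.map String.toList)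
  if (joined.length : Int) ≤ max_chars then String.ofList (pvEscape joined)
  else
    let lines := enzLoopA max_chars (PySem.Chars.split₀ joined) [] []
    String.ofList (PySem.Chars.join "<BR/>".toList (lines.map pvEscape))

-- ===== PORT B =====
-- B's _take_line: first greedy line of `words` plus the remaining words (while loop over the
-- word list → structural recursion extending `line` while the next word still fits)
def enzTakeLine (mc : Int) (line : List Char) : List (List Char) → List Char × List (List Char)
  | [] => (line, [])
  | w :: rest =>
    if (line.length : Int) + 1 + w.length ≤ mc then enzTakeLine mc (line ++ ' ' :: w) rest
    else (line, w :: rest)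

def enz_html_py_alt (cats : List String) (max_chars : Int) : String :=
  let joined := PySem.Chars.join ", ".toList (cats.map String.toList)
  if (joined.length : Int) ≤ max_chars then String.ofList (pvEscape joined)
  else
    match PySem.Chars.split₀ joined with
    | [] => ""
    | w :: ws =>
      let p1 := enzTakeLine max_chars w ws
      let lines :=
        match p1.2 with
        | [] => [p1.1]
        | r :: rs =>
          let p2 := enzTakeLine max_chars r rs
          if p2.2.isEmpty then [p1.1, p2.1] else [p1.1, pvRstripComma p2.1 ++ "…".toList]
      String.ofList (PySem.Chars.join "<BR/>".toList (lines.map pvEscape))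

-- ===== PRECONDITION & SPEC =====
def Spec_enz_html_py (cats : List String) (max_chars : Int) (out : String) : Prop := out = enz_html_py_alt cats max_chars
instance (cats : List String) (max_chars : Int) (out : String) : Decidable (Spec_enz_html_py cats max_chars out) := by unfold Spec_enz_html_py; infer_instance

-- ===== CLAIM (what is proved, stated in full; the proofs are below) =====
def Claim_equal_enz_html_py : Prop := ∀ (cats : List String) (max_chars : Int), Dom_enz_html_py cats max_chars → Spec_enz_html_py cats max_chars (enz_html_py cats max_chars)

-- ===== LEMMAS AND PROOFS =====

-- proof-side reference: the plain uncapped greedy wrap, and the 2-line cap, as pure functions;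
-- A is shown to equal cap2 ∘ wrap, and B's takeLine formulation is shown to equal it as well
def enzWrap (mc : Int) : List (List Char) → List (List Char) → List Char → List (List Char)
  | [], lines, cur => if cur.isEmpty then lines else lines ++ [cur]
  | w :: rest, lines, cur =>
    if ¬cur.isEmpty ∧ (cur.length : Int) + 1 + w.length > mc then
      enzWrap mc rest (lines ++ [cur]) w
    else enzWrap mc rest lines (if cur.isEmpty then w else cur ++ ' ' :: w)

def enzCap2 (lines : List (List Char)) : List (List Char) :=
  if lines.length > 2 then [lines[0]!, pvRstripComma lines[1]! ++ "…".toList] else lines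

-- a word produced by str.split(): nonempty and whitespace-free
def pvWordOK (w : List Char) : Prop := w ≠ [] ∧ ∀ c ∈ w, PySem.Chars.isspace c = false

-- a current-line buffer: empty, or first and last chars are non-whitespace
def pvCurOK (cur : List Char) : Prop :=
  (∀ c ∈ cur.head?, PySem.Chars.isspace c = false) ∧ (∀ c ∈ cur.getLast?, PySem.Chars.isspace c = false)

theorem split₀_go_wordOK (s : List Char) :
    ∀ cur acc, (∀ c ∈ cur, PySem.Chars.isspace c = false) →
      (∀ w ∈ acc, pvWordOK w) →
      ∀ w ∈ PySem.Chars.split₀.go s cur acc, pvWordOK w := by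
  induction s with
  | nil =>
    intro cur acc hcur hacc w hw
    simp only [PySem.Chars.split₀.go] at hw
    by_cases h : cur.isEmpty
    · simp [h] at hw; exact hacc _ (by simpa using hw)
    · simp [h] at hw
      rcases hw with h' | h'
      · exact hacc _ h'
      · subst h'
        refine ⟨by simpa [List.isEmpty_iff] using h, ?_⟩
        intro c hc; exact hcur c (by simpa using hc)
  | cons c rest ih =>
    intro cur acc hcur hacc w hw
    simp only [PySem.Chars.split₀.go] at hw
    by_cases hs : PySem.Chars.isspace c
    · by_cases he : cur.isEmpty
      · simp [hs, he] at hw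
        exact ih [] acc (by simp) hacc w hw
      · simp [hs, he] at hw
        refine ih [] (cur.reverse :: acc) (by simp) ?_ w hw
        intro x hx
        rcases List.mem_cons.mp hx with hx | hx
        · subst hx
          refine ⟨by simpa [List.isEmpty_iff] using he, ?_⟩
          intro d hd; exact hcur d (by simpa using hd)
        · exact hacc x hx
    · simp [hs] at hw
      refine ih (c :: cur) acc ?_ hacc w hw
      intro d hd
      rcases List.mem_cons.mp hd with hd | hd
      · simpa [hd] using hs
      · exact hcur d hd

theorem split₀_wordOK (s : List Char) : ∀ w ∈ PySem.Chars.split₀ s, pvWordOK w := by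
  intro w hw
  exact split₀_go_wordOK s [] [] (by simp) (by simp) w (by simpa [PySem.Chars.split₀] using hw)

theorem wordOK_curOK {w : List Char} (h : pvWordOK w) : pvCurOK w := by
  obtain ⟨hne, hall⟩ := h
  constructor
  · intro c hc; exact hall c (List.mem_of_mem_head? hc)
  · intro c hc; exact hall c (List.mem_of_mem_getLast? hc)

-- appending " " ++ w to a nonempty OK buffer keeps it OK
theorem curOK_extend {cur w : List Char} (hc : pvCurOK cur) (hcur : cur ≠ [])
    (hw : pvWordOK w) : pvCurOK (cur ++ ' ' :: w) := by
  obtain ⟨hh, _⟩ := hc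
  constructor
  · intro c hc'
    rcases cur with _ | ⟨a, t⟩
    · exact absurd rfl hcur
    · exact hh c (by simpa using hc')
  · intro c hc'
    have hgl : (cur ++ ' ' :: w).getLast? = w.getLast? := by
      rw [List.getLast?_append_of_ne_nil cur (by simp : (' ' :: w : List Char) ≠ [])]
      rcases w with _ | ⟨a, t⟩
      · exact absurd rfl hw.1
      · simp
    rw [hgl] at hc'
    exact hw.2 c (List.mem_of_mem_getLast? hc')

-- (cur + " " + w).strip() is a no-op under the loop invariant
theorem strip_extend_id {cur w : List Char} (hc : pvCurOK cur) (hcur : cur ≠ [])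
    (hw : pvWordOK w) : PySem.Chars.strip (cur ++ ' ' :: w) = cur ++ ' ' :: w := by
  have hok := curOK_extend hc hcur hw
  obtain ⟨hh, hl⟩ := hok
  have hne : cur ++ ' ' :: w ≠ [] := by simp
  rcases he : cur ++ ' ' :: w with _ | ⟨a, t⟩
  · exact absurd he hne
  · rw [← he]
    have hha : PySem.Chars.isspace a = false := by
      apply hh; rw [he]; simp
    have hlast : ∀ c ∈ (cur ++ ' ' :: w).getLast?, PySem.Chars.isspace c = false := hl
    have hlstrip : PySem.Chars.lstrip (cur ++ ' ' :: w) = cur ++ ' ' :: w := by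
      simp only [PySem.Chars.lstrip, he]
      rw [List.dropWhile_cons_of_neg (by simp [hha])]
    have hrev : (cur ++ ' ' :: w).reverse ≠ [] := by simp
    have hrstrip : PySem.Chars.rstrip (cur ++ ' ' :: w) = cur ++ ' ' :: w := by
      simp only [PySem.Chars.rstrip]
      rcases hr : (cur ++ ' ' :: w).reverse with _ | ⟨b, rt⟩
      · exact absurd hr hrev
      · have hb : (cur ++ ' ' :: w).getLast? = some b := by
          rw [List.getLast?_eq_head?_reverse, hr]; rfl
        have hbs : PySem.Chars.isspace b = false := hlast b (by simp [hb])
        rw [List.dropWhile_cons_of_neg (by simp [hbs]), ← hr, List.reverse_reverse]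
    simp only [PySem.Chars.strip, hlstrip, hrstrip]

-- the uncapped wrap only ever appends to `lines`
theorem enzWrap_append (mc : Int) (ws : List (List Char)) :
    ∀ lines cur, enzWrap mc ws lines cur = lines ++ enzWrap mc ws [] cur := by
  induction ws with
  | nil => intro lines cur; by_cases h : cur.isEmpty <;> simp [enzWrap, h]
  | cons w rest ih =>
    intro lines cur
    by_cases h : ¬cur.isEmpty ∧ (cur.length : Int) + 1 + w.length > mc
    · simp only [enzWrap, if_pos h]
      rw [ih (lines ++ [cur]) w, ih ([] ++ [cur]) w, List.nil_append, List.append_assoc]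
    · simp only [enzWrap, if_neg h]
      exact ih lines _

-- with a nonempty buffer the uncapped wrap emits at least one line
theorem enzWrap_ne_nil (mc : Int) (ws : List (List Char)) :
    ∀ cur, (∀ w ∈ ws, pvWordOK w) → cur ≠ [] → enzWrap mc ws [] cur ≠ [] := by
  induction ws with
  | nil => intro cur _ hcur; simp [enzWrap, List.isEmpty_iff, hcur]
  | cons w rest ih =>
    intro cur hws hcur
    by_cases h : ¬cur.isEmpty ∧ (cur.length : Int) + 1 + w.length > mc
    · simp only [enzWrap, if_pos h]
      rw [enzWrap_append]
      simp
    · simp only [enzWrap, if_neg h]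
      rcases em (cur.isEmpty = true) with he | he
      · simp only [he]
        exact ih w (fun x hx => hws x (List.mem_cons_of_mem _ hx)) (hws w (by simp)).1
      · simp only [he]
        exact ih _ (fun x hx => hws x (List.mem_cons_of_mem _ hx)) (by simp)

-- phase 1: one line already emitted; A's capped loop = cap₂ of the uncapped wrap
theorem loopA_one (mc : Int) (ws : List (List Char)) :
    ∀ cur l0, (∀ w ∈ ws, pvWordOK w) → pvCurOK cur →
      enzLoopA mc ws [l0] cur = enzCap2 ([l0] ++ enzWrap mc ws [] cur) := by
  induction ws with
  | nil =>
    intro cur l0 _ _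
    by_cases h : cur.isEmpty <;> simp [enzLoopA, enzWrap, enzCap2, h]
  | cons w rest ih =>
    intro cur l0 hws hcur
    have hw : pvWordOK w := hws w (by simp)
    have hrest : ∀ x ∈ rest, pvWordOK x := fun x hx => hws x (List.mem_cons_of_mem _ hx)
    by_cases h : ¬cur.isEmpty ∧ (cur.length : Int) + 1 + w.length > mc
    · simp only [enzLoopA, enzWrap, if_pos h]
      rw [enzWrap_append]
      have hX : enzWrap mc rest [] w ≠ [] := enzWrap_ne_nil mc rest w hrest hw.1
      rcases hXe : enzWrap mc rest [] w with _ | ⟨x, xt⟩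
      · exact absurd hXe hX
      · simp [enzCap2]
    · simp only [enzLoopA, enzWrap, if_neg h]
      rcases em (cur.isEmpty = true) with he | he
      · simp only [he]
        exact ih w l0 hrest (wordOK_curOK hw)
      · have hcne : cur ≠ [] := by simpa [List.isEmpty_iff] using he
        simp only [he]
        rw [strip_extend_id hcur hcne hw]
        exact ih _ l0 hrest (curOK_extend hcur hcne hw)

-- phase 0: no line yet; A's capped loop = cap₂ of the uncapped wrap
theorem loopA_zero (mc : Int) (ws : List (List Char)) :
    ∀ cur, (∀ w ∈ ws, pvWordOK w) → pvCurOK cur →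
      enzLoopA mc ws [] cur = enzCap2 (enzWrap mc ws [] cur) := by
  induction ws with
  | nil =>
    intro cur _ _
    by_cases h : cur.isEmpty <;> simp [enzLoopA, enzWrap, enzCap2, h]
  | cons w rest ih =>
    intro cur hws hcur
    have hw : pvWordOK w := hws w (by simp)
    have hrest : ∀ x ∈ rest, pvWordOK x := fun x hx => hws x (List.mem_cons_of_mem _ hx)
    by_cases h : ¬cur.isEmpty ∧ (cur.length : Int) + 1 + w.length > mc
    · simp only [enzLoopA, enzWrap, if_pos h]
      rw [if_neg (by simp)]
      simp only [List.nil_append]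
      rw [loopA_one mc rest w cur hrest (wordOK_curOK hw)]
      rw [enzWrap_append mc rest [cur] w]
    · simp only [enzLoopA, enzWrap, if_neg h]
      rcases em (cur.isEmpty = true) with he | he
      · simp only [he]
        exact ih w hrest (wordOK_curOK hw)
      · have hcne : cur ≠ [] := by simpa [List.isEmpty_iff] using he
        simp only [he]
        rw [strip_extend_id hcur hcne hw]
        exact ih _ hrest (curOK_extend hcur hcne hw)

-- B's takeLine: the uncapped wrap with nonempty buffer = first takeLine line, then wrap the rest
theorem wrap_takeLine (mc : Int) (ws : List (List Char)) :
    ∀ cur, cur ≠ [] →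
      enzWrap mc ws [] cur =
        (enzTakeLine mc cur ws).1 ::
          (match (enzTakeLine mc cur ws).2 with
           | [] => []
           | r :: rs => enzWrap mc rs [] r) := by
  induction ws with
  | nil => intro cur hcur; simp [enzWrap, enzTakeLine, List.isEmpty_iff, hcur]
  | cons w rest ih =>
    intro cur hcur
    by_cases hle : (cur.length : Int) + 1 + w.length ≤ mc
    · have h : ¬(¬cur.isEmpty ∧ (cur.length : Int) + 1 + w.length > mc) := by
        intro h'; omega
      simp only [enzWrap, enzTakeLine, if_neg h, if_pos hle]
      have he : cur.isEmpty = false := by simpa [List.isEmpty_iff] using hcur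
      simp only [he]
      exact ih (cur ++ ' ' :: w) (by simp)
    · have h : ¬cur.isEmpty ∧ (cur.length : Int) + 1 + w.length > mc := by
        constructor
        · simpa [List.isEmpty_iff] using hcur
        · omega
      simp only [enzWrap, enzTakeLine, if_pos h, if_neg hle]
      rw [enzWrap_append]
      simp
  
-- takeLine's remaining words come from the input word list
theorem takeLine_snd_mem (mc : Int) (ws : List (List Char)) :
    ∀ cur x, x ∈ (enzTakeLine mc cur ws).2 → x ∈ ws := by
  induction ws with
  | nil => intro cur x hx; simp [enzTakeLine] at hx
  | cons w rest ih =>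
    intro cur x hx
    by_cases hle : (cur.length : Int) + 1 + w.length ≤ mc
    · simp only [enzTakeLine, if_pos hle] at hx
      exact List.mem_cons_of_mem _ (ih _ x hx)
    · simp only [enzTakeLine, if_neg hle] at hx
      exact hx

-- ===== VERDICT (by name: the statement is the Claim_ definition above) =====
theorem enz_html_py_spec : Claim_equal_enz_html_py := by
  intro cats max_chars _
  unfold Spec_enz_html_py enz_html_py enz_html_py_alt
  by_cases h : ((PySem.Chars.join ", ".toList (cats.map String.toList)).length : Int) ≤ max_chars
  · simp only [if_pos h]
  · simp only [if_neg h]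
    have hwords := split₀_wordOK (PySem.Chars.join ", ".toList (cats.map String.toList))
    rw [loopA_zero max_chars _ [] hwords (by constructor <;> simp)]
    generalize hg : PySem.Chars.split₀ (PySem.Chars.join ", ".toList (cats.map String.toList)) = js at hwords ⊢
    cases js with
    | nil => simp [enzWrap, enzCap2, PySem.Chars.join, List.intercalate]
    | cons w ws =>
      dsimp only
      have hw : pvWordOK w := hwords w (by simp)
      have hws : ∀ x ∈ ws, pvWordOK x := fun x hx => hwords x (List.mem_cons_of_mem _ hx)
      have h0 : enzWrap max_chars (w :: ws) [] [] = enzWrap max_chars ws [] w := by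
        simp [enzWrap]
      rw [h0, wrap_takeLine max_chars ws w hw.1]
      rcases h1 : (enzTakeLine max_chars w ws).2 with _ | ⟨r, rs⟩
      · dsimp only
        simp [enzCap2]
      · dsimp only
        have hr : pvWordOK r := hws r (takeLine_snd_mem _ _ _ _ (h1 ▸ List.mem_cons_self ..))
        have hrs : ∀ x ∈ rs, pvWordOK x := fun x hx =>
          hws x (takeLine_snd_mem _ _ _ _ (h1 ▸ List.mem_cons_of_mem _ hx))
        rw [wrap_takeLine max_chars rs r hr.1]
        rcases h2 : (enzTakeLine max_chars r rs).2 with _ | ⟨r2, rs2⟩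
        · dsimp only
          simp [enzCap2]
        · dsimp only
          have hr2 : pvWordOK r2 := hrs r2 (takeLine_snd_mem _ _ _ _ (h2 ▸ List.mem_cons_self ..))
          have hne : enzWrap max_chars rs2 [] r2 ≠ [] := by
            refine enzWrap_ne_nil _ _ _ (fun x hx => ?_) hr2.1
            exact hrs x (takeLine_snd_mem _ _ _ _ (h2 ▸ List.mem_cons_of_mem _ hx))
          rcases hX : enzWrap max_chars rs2 [] r2 with _ | ⟨x, xt⟩
          · exact absurd hX hne
          · simp [enzCap2]
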